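-- pv_equiv track=rewrite | github.com/cirosantilli/project-euler-solvers | solvers/168.py | solve
-- ===== SOURCE A (Python) =====
-- def search(num_digits: int, multiplier: int, last_digit: int, modulo: int) -> int:
--     shift = 10
--     carry = 0
--
--     current = last_digit
--     result = last_digit
--
--     while num_digits > 1:
--         num_digits -= 1
--         next_val = multiplier * current + carry
--         carry = next_val // 10
--         current = next_val % 10
--
--         if shift < modulo:
--             result += current * shift
--             shift *= 10
--
--     first = multiplier * current + carry
--     if current == 0 or first != last_digit:
--         return 0
--
--     return result
--
-- def solve(max_digits: int) -> int:
--     modulo = 100000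
--     result = 0
--
--     for num_digits in range(2, max_digits + 1):
--         for multiplier in range(1, 10):
--             for last_digit in range(1, 10):
--                 result += search(num_digits, multiplier, last_digit, modulo)
--
--     return result % modulo
-- ===== SOURCE B (Python) =====
-- def solve(max_digits: int) -> int:
--     # One incremental forward pass per (multiplier, last_digit) pair:
--     # extend the digit stream once and test closure at every length.
--     modulo = 100000
--     total = 0
--     for multiplier in range(1, 10):
--         for last_digit in range(1, 10):
--             shift = 10
--             carry = 0
--             current = last_digit
--             result = last_digit
--             for _ in range(2, max_digits + 1):
--                 next_val = multiplier * current + carry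
--                 carry = next_val // 10
--                 current = next_val % 10
--                 if shift < modulo:
--                     result += current * shift
--                     shift *= 10
--                 if current != 0 and multiplier * current + carry == last_digit:
--                     total += result
--     return total % modulo
-- ===== Notes on version B (the rewrite author's own statement) =====
-- stated objective: faster
-- what changed: Instead of re-running the digit recurrence from scratch for every length (search called once per num_digits), B makes one incremental forward pass per (multiplier,last_digit) pair, extending the digit stream step by step and testing the closure condition at every length.
import Mathlib
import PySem

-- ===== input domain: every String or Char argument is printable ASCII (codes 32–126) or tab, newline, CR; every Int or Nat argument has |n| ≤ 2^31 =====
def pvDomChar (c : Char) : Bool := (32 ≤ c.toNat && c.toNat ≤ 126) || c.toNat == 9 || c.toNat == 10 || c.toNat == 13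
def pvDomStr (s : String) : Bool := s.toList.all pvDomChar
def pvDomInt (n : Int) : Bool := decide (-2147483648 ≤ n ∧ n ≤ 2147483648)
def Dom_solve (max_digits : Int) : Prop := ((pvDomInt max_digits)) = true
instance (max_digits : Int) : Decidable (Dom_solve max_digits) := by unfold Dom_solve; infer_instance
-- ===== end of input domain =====

-- B replaces A's fresh O(n) simulation per length with one incremental pass per
-- (multiplier, last_digit) pair, checking closure at every length: O(n) vs O(n^2).

-- ===== PORT A =====
-- the while loop of `search`: state (shift, carry, current, result), fuel = num_digits - 1
def searchAux (multiplier modulo : Int) : Nat → Int × Int × Int × Int → Int × Int × Int × Int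
  | 0, st => st
  | n + 1, (shift, carry, current, result) =>
    let next_val := multiplier * current + carry
    let carry' := PySem.Int.floordiv next_val 10
    let current' := PySem.Int.mod next_val 10
    if shift < modulo then
      searchAux multiplier modulo n (shift * 10, carry', current', result + current' * shift)
    else
      searchAux multiplier modulo n (shift, carry', current', result)

def search (num_digits multiplier last_digit modulo : Int) : Int :=
  let st := searchAux multiplier modulo (num_digits - 1).toNat (10, 0, last_digit, last_digit)
  let first := multiplier * st.2.2.1 + st.2.1
  if st.2.2.1 = 0 ∨ first ≠ last_digit then 0 else st.2.2.2

def solve (max_digits : Int) : Int :=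
  let result := (PySem.List.pyRange 2 (max_digits + 1) 1).foldl (fun acc num_digits =>
    (PySem.List.pyRange 1 10 1).foldl (fun acc multiplier =>
      (PySem.List.pyRange 1 10 1).foldl (fun acc last_digit =>
        acc + search num_digits multiplier last_digit 100000) acc) acc) 0
  PySem.Int.mod result 100000

-- ===== PORT B =====
-- body of B's inner loop: state (shift, carry, current, result, total)
def bstep (multiplier last_digit : Int) (st : Int × Int × Int × Int × Int) :
    Int × Int × Int × Int × Int :=
  let (shift, carry, current, result, total) := st
  let next_val := multiplier * current + carry
  let carry' := PySem.Int.floordiv next_val 10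
  let current' := PySem.Int.mod next_val 10
  let (result', shift') :=
    if shift < 100000 then (result + current' * shift, shift * 10) else (result, shift)
  let total' :=
    if current' ≠ 0 ∧ multiplier * current' + carry' = last_digit then total + result' else total
  (shift', carry', current', result', total')

def solve_alt (max_digits : Int) : Int :=
  let total := (PySem.List.pyRange 1 10 1).foldl (fun total multiplier =>
    (PySem.List.pyRange 1 10 1).foldl (fun total last_digit =>
      ((PySem.List.pyRange 2 (max_digits + 1) 1).foldl
        (fun st _ => bstep multiplier last_digit st)
        (10, 0, last_digit, last_digit, total)).2.2.2.2) total) 0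
  PySem.Int.mod total 100000

-- ===== PRECONDITION & SPEC =====
def Spec_solve (max_digits : Int) (out : Int) : Prop := out = solve_alt max_digits
instance (max_digits : Int) (out : Int) : Decidable (Spec_solve max_digits out) := by unfold Spec_solve; infer_instance

-- ===== CLAIM (what is proved, stated in full; the proofs are below) =====
def Claim_equal_solve : Prop := ∀ (max_digits : Int), Dom_solve max_digits → Spec_solve max_digits (solve max_digits)

-- ===== LEMMAS AND PROOFS =====

-- one step of the shared digit recurrence (with A's modulo fixed to 100000, as solve calls it)
def gstep (m : Int) (st : Int × Int × Int × Int) : Int × Int × Int × Int :=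
  let nv := m * st.2.2.1 + st.2.1
  let c' := PySem.Int.floordiv nv 10
  let cu := PySem.Int.mod nv 10
  if st.1 < 100000 then (st.1 * 10, c', cu, st.2.2.2 + cu * st.1) else (st.1, c', cu, st.2.2.2)

-- A's closure check applied to a state
def chk (m d : Int) (st : Int × Int × Int × Int) : Int :=
  if st.2.2.1 = 0 ∨ m * st.2.2.1 + st.2.1 ≠ d then 0 else st.2.2.2

lemma searchAux_eq_iterate (m : Int) : ∀ (n : Nat) (st : Int × Int × Int × Int),
    searchAux m 100000 n st = (gstep m)^[n] st := by
  intro n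
  induction n with
  | zero => intro st; rfl
  | succ k ih =>
    rintro ⟨s, c, cu, r⟩
    rw [Function.iterate_succ_apply]
    simp only [searchAux, gstep]
    split_ifs <;> exact ih _

lemma search_eq_chk (n m d : Int) :
    search n m d 100000 = chk m d ((gstep m)^[(n - 1).toNat] (10, 0, d, d)) := by
  simp only [search, chk, searchAux_eq_iterate]

lemma bstep_eq (m d : Int) (s c cu r acc : Int) :
    bstep m d (s, c, cu, r, acc) =
      ((gstep m (s, c, cu, r)).1, (gstep m (s, c, cu, r)).2.1, (gstep m (s, c, cu, r)).2.2.1,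
       (gstep m (s, c, cu, r)).2.2.2, acc + chk m d (gstep m (s, c, cu, r))) := by
  simp only [bstep, gstep, chk]
  split_ifs <;> simp_all

-- B's inner fold over any list of length L: the running state is gstep iterated, and the
-- accumulator collects the closure contribution at every length.
lemma bfold (m d : Int) : ∀ (l : List Int) (st : Int × Int × Int × Int) (acc : Int),
    l.foldl (fun st _ => bstep m d st) (st.1, st.2.1, st.2.2.1, st.2.2.2, acc) =
      (((gstep m)^[l.length] st).1, ((gstep m)^[l.length] st).2.1,
       ((gstep m)^[l.length] st).2.2.1, ((gstep m)^[l.length] st).2.2.2,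
       acc + ((List.range l.length).map (fun k => chk m d ((gstep m)^[k + 1] st))).sum) := by
  intro l
  induction l with
  | nil => intro st acc; simp
  | cons x xs ih =>
    rintro ⟨s, c, cu, r⟩ acc
    have hx := ih (gstep m (s, c, cu, r)) (acc + chk m d (gstep m (s, c, cu, r)))
    simp only [List.foldl_cons, bstep_eq, hx, List.length_cons]
    have hit : ∀ k : Nat, (gstep m)^[k] (gstep m (s, c, cu, r)) =
        (gstep m)^[k + 1] (s, c, cu, r) := by
      intro k; rw [Function.iterate_succ_apply]
    simp only [hit, Prod.mk.injEq, true_and]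
    rw [List.range_succ_eq_map]
    simp only [List.map_cons, List.map_map, List.sum_cons, Nat.zero_add,
      Function.iterate_one]
    have hs : ∀ l : List Nat,
        (l.map (fun k => chk m d ((gstep m)^[k + 1 + 1] (s, c, cu, r)))).sum =
          (l.map ((fun k => chk m d ((gstep m)^[k + 1] (s, c, cu, r))) ∘ Nat.succ)).sum := by
      intro l
      refine congrArg List.sum (List.map_congr_left ?_)
      intro k _
      simp only [Function.comp]
    rw [hs]
    ring

-- the per-(m,d) total both programs must agree on
def S (M m d : Int) : Int :=
  ((PySem.List.pyRange 2 (M + 1) 1).map (fun n => search n m d 100000)).sum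

lemma innerB_eq (M m d acc : Int) :
    ((PySem.List.pyRange 2 (M + 1) 1).foldl (fun st _ => bstep m d st)
      (10, 0, d, d, acc)).2.2.2.2 = acc + S M m d := by
  have h := bfold m d (PySem.List.pyRange 2 (M + 1) 1) (10, 0, d, d) acc
  simp only [h]
  congr 1
  rw [PySem.List.length_pyRange_one, S, PySem.List.pyRange_one, List.map_map]
  congr 1
  refine List.map_congr_left ?_
  intro k _
  simp only [Function.comp, search_eq_chk]
  congr 2
  omega

-- swap a double list sum
lemma sum_swap {α β : Type} (f : α → β → Int) : ∀ (l1 : List α) (l2 : List β),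
    (l1.map (fun a => (l2.map (fun b => f a b)).sum)).sum =
      (l2.map (fun b => (l1.map (fun a => f a b)).sum)).sum := by
  intro l1
  induction l1 with
  | nil => intro l2; simp
  | cons x xs ih =>
    intro l2
    simp only [List.map_cons, List.sum_cons, ih, ← PySem.List.sum_map_add_int]

theorem solve_eq_alt (M : Int) : solve M = solve_alt M := by
  simp only [solve, solve_alt, innerB_eq, PySem.List.foldl_add]
  congr 1
  simp only [zero_add]
  rw [sum_swap (fun n m =>
    ((PySem.List.pyRange 1 10 1).map (fun d => search n m d 100000)).sum)]
  congr 1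
  refine List.map_congr_left ?_
  intro m _
  rw [sum_swap (fun n d => search n m d 100000)]
  rfl

-- ===== VERDICT (by name: the statement is the Claim_ definition above) =====
theorem solve_spec : Claim_equal_solve := by
  intro M _
  unfold Spec_solve
  exact solve_eq_alt M
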